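-- pv_equiv track=rewrite | github.com/checull/FIndingDodo | scenes.py | build_contiguous_runs
-- ===== SOURCE A (Python) =====
-- def build_contiguous_runs(points):
--     by_row = {}
--     for x, y in points:
--         by_row.setdefault(y, []).append(x)
--     runs = {}
--     for y, xs in by_row.items():
--         xs.sort()
--         start = xs[0]
--         prev = xs[0]
--         row_runs = []
--         for x in xs[1:]:
--             if x == prev + 1:
--                 prev = x
--             else:
--                 row_runs.append((start, prev))
--                 start = prev = x
--         row_runs.append((start, prev))
--         runs[y] = row_runs
--     return runs
-- ===== SOURCE B (Python) =====
-- def build_contiguous_runs(points):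
--     by_row = {}
--     for x, y in points:
--         by_row.setdefault(y, []).append(x)
--     runs = {}
--     for y, xs in by_row.items():
--         xs.sort()
--         breaks = [(a, b) for a, b in zip(xs, xs[1:]) if b != a + 1]
--         starts = xs[:1] + [b for a, b in breaks]
--         ends = [a for a, b in breaks] + xs[-1:]
--         runs[y] = list(zip(starts, ends))
--     return runs
-- ===== Notes on version B (the rewrite author's own statement) =====
-- stated objective: idiomatic
-- what changed: A's per-row start/prev state machine is replaced by a break-point formulation: zip each sorted row with its shift, filter the adjacent pairs that are not successors, and zip the run starts (first element plus each break's right value) with the run ends (each break's left value plus the last element).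
import Mathlib
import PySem

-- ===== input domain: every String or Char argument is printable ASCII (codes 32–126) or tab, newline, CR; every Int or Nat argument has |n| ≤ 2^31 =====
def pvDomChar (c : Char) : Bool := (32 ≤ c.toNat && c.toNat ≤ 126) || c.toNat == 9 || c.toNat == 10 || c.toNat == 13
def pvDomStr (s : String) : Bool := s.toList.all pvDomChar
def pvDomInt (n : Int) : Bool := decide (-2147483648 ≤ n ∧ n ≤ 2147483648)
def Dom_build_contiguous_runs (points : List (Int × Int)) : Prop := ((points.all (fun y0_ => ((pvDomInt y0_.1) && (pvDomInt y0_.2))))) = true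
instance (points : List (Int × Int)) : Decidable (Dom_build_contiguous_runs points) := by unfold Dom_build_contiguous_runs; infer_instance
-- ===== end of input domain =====

-- B replaces A's explicit start/prev run state machine by a break-point formulation
-- (zip adjacent pairs, filter the non-successor pairs, zip run starts with run ends); objective: idiomatic, same cost.

-- ===== PORT A =====
-- A's inner loop over xs[1:] with state (start, prev, row_runs); the [] case is
-- unreachable (every row list built by the grouping pass is nonempty; A indexes xs[0]).
def pvARow (xs : List Int) : List (Int × Int) :=
  match xs with
  | [] => []
  | x :: rest =>
      let st := rest.foldl
        (fun (st : Int × Int × List (Int × Int)) (x : Int) =>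
          if x = st.2.1 + 1 then (st.1, x, st.2.2)
          else (x, x, st.2.2 ++ [(st.1, st.2.1)]))
        (x, x, ([] : List (Int × Int)))
      st.2.2 ++ [(st.1, st.2.1)]

def build_contiguous_runs (points : List (Int × Int)) : List (Int × List (Int × Int)) :=
  let by_row := points.foldl
    (fun (d : PySem.Dict Int (List Int)) (p : Int × Int) =>
      d.modify p.2 [] (fun l => l ++ [p.1])) PySem.Dict.empty
  let runs := by_row.items.foldl
    (fun (r : PySem.Dict Int (List (Int × Int))) (q : Int × List Int) =>
      r.insert q.1 (pvARow (PySem.List.sorted q.2 (fun v => v) false))) PySem.Dict.empty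
  runs.items

-- ===== PORT B =====
-- B's row computation: breaks = [(a,b) for a,b in zip(xs, xs[1:]) if b != a+1];
-- runs = zip(xs[:1] + [b for _,b in breaks], [a for a,_ in breaks] + xs[-1:]).
def pvBRow (xs : List Int) : List (Int × Int) :=
  let breaks := (xs.zip (PySem.List.slice xs (some 1) none)).filter
    (fun ab => ab.2 != ab.1 + 1)
  let starts := PySem.List.slice xs none (some 1) ++ breaks.map (·.2)
  let ends := breaks.map (·.1) ++ PySem.List.slice xs (some (-1)) none
  starts.zip ends

def build_contiguous_runs_alt (points : List (Int × Int)) : List (Int × List (Int × Int)) :=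
  let by_row := points.foldl
    (fun (d : PySem.Dict Int (List Int)) (p : Int × Int) =>
      d.modify p.2 [] (fun l => l ++ [p.1])) PySem.Dict.empty
  let runs := by_row.items.foldl
    (fun (r : PySem.Dict Int (List (Int × Int))) (q : Int × List Int) =>
      r.insert q.1 (pvBRow (PySem.List.sorted q.2 (fun v => v) false))) PySem.Dict.empty
  runs.items

-- ===== PRECONDITION & SPEC =====
def Spec_build_contiguous_runs (points : List (Int × Int)) (out : List (Int × List (Int × Int))) : Prop := out = build_contiguous_runs_alt points
instance (points : List (Int × Int)) (out : List (Int × List (Int × Int))) : Decidable (Spec_build_contiguous_runs points out) := by unfold Spec_build_contiguous_runs; infer_instance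

-- ===== CLAIM (what is proved, stated in full; the proofs are below) =====
def Claim_equal_build_contiguous_runs : Prop := ∀ (points : List (Int × Int)), Dom_build_contiguous_runs points → Spec_build_contiguous_runs points (build_contiguous_runs points)

-- ===== LEMMAS AND PROOFS =====

-- A's state machine, written as a recursion on the remaining list (proof device).
def pvG (s p : Int) : List Int → List (Int × Int)
  | [] => [(s, p)]
  | x :: t => if x = p + 1 then pvG s x t else (s, p) :: pvG x x t

lemma pvFoldl_eq_pvG : ∀ (l : List Int) (s p : Int) (rs : List (Int × Int)),
    (let st := l.foldl
        (fun (st : Int × Int × List (Int × Int)) (x : Int) =>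
          if x = st.2.1 + 1 then (st.1, x, st.2.2)
          else (x, x, st.2.2 ++ [(st.1, st.2.1)])) (s, p, rs);
      st.2.2 ++ [(st.1, st.2.1)]) = rs ++ pvG s p l := by
  intro l
  induction l with
  | nil => intro s p rs; simp [pvG]
  | cons x t ih =>
      intro s p rs
      by_cases h : x = p + 1
      · simp only [List.foldl_cons, if_pos h, pvG, ih]
      · simp only [List.foldl_cons, if_neg h, pvG, ih, List.append_assoc, List.cons_append, List.nil_append]

lemma pvG_eq_breaks : ∀ (l : List Int) (s p : Int),
    pvG s p l =
      (s :: (((p :: l).zip l).filter (fun ab => ab.2 != ab.1 + 1)).map (·.2)).zip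
        ((((p :: l).zip l).filter (fun ab => ab.2 != ab.1 + 1)).map (·.1) ++ [(p :: l).getLastD 0]) := by
  intro l
  induction l with
  | nil => intro s p; simp [pvG]
  | cons x t ih =>
      intro s p
      by_cases h : x = p + 1
      · simp only [pvG, if_pos h]
        rw [ih s x]
        simp [show (x != p + 1) = false by simpa using h]
      · simp only [pvG, if_neg h]
        rw [ih x x]
        simp [show (x != p + 1) = true by simpa using h]

lemma pvLast_slice (x : Int) (l : List Int) :
    PySem.List.slice (x :: l) (some (-1)) none = [(x :: l).getLastD 0] := by
  rw [PySem.List.slice_from_neg_one]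
  induction l generalizing x with
  | nil => simp
  | cons y t ih =>
      have : (x :: y :: t).length - 1 = Nat.succ ((y :: t).length - 1) := by
        simp [Nat.succ_eq_add_one]
      rw [this, List.drop_succ_cons, ih y]
      simp

@[simp] lemma pvRow_eq (xs : List Int) : pvARow xs = pvBRow xs := by
  cases xs with
  | nil => rfl
  | cons x l =>
      rw [show pvARow (x :: l) = [] ++ pvG x x l from pvFoldl_eq_pvG l x x []]
      rw [List.nil_append, pvG_eq_breaks l x x]
      simp only [pvBRow, PySem.List.slice_from_one, List.tail_cons, pvLast_slice,
        PySem.List.slice_to (x :: l) (by norm_num : (0:Int) ≤ 1)]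
      rfl

-- ===== VERDICT (by name: the statement is the Claim_ definition above) =====
theorem build_contiguous_runs_spec : Claim_equal_build_contiguous_runs := by
  intro points _
  unfold Spec_build_contiguous_runs build_contiguous_runs build_contiguous_runs_alt
  simp only [pvRow_eq]
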